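-- pv_equiv track=rewrite | github.com/jaredalbright/llms-txt-generator | backend/app/prompts/categorize.py | search_homepage_content
-- ===== SOURCE A (Python) =====
-- def search_homepage_content(homepage_markdown: str, query: str, context_lines: int = 3) -> str:
--     """Search homepage markdown for a query, returning matching lines with context."""
--     lines = homepage_markdown.split("\n")
--     query_lower = query.lower()
--     matching_indices = set()
--
--     for i, line in enumerate(lines):
--         if query_lower in line.lower():
--             for j in range(max(0, i - context_lines), min(len(lines), i + context_lines + 1)):
--                 matching_indices.add(j)
--
--     if not matching_indices:
--         return f"No matches found for '{query}'."
--
--     sorted_indices = sorted(matching_indices)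
--     result_lines = []
--     prev_idx = -2
--     for idx in sorted_indices:
--         if idx > prev_idx + 1:
--             result_lines.append("---")
--         result_lines.append(lines[idx])
--         prev_idx = idx
--
--     return "\n".join(result_lines)
-- ===== SOURCE B (Python) =====
-- def search_homepage_content(homepage_markdown: str, query: str, context_lines: int = 3) -> str:
--     """Single scan: a line is kept iff some line within context_lines of it matches;
--     emit '---' whenever a kept line follows a non-kept position."""
--     lines = homepage_markdown.split("\n")
--     query_lower = query.lower()
--     matched = [query_lower in line.lower() for line in lines]
--     n = len(lines)
--
--     def keep(i):
--         lo = max(0, i - context_lines)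
--         hi = min(n, i + context_lines + 1)
--         return any(matched[j] for j in range(lo, hi))
--
--     out = []
--     prev_kept = False
--     for i in range(n):
--         if keep(i):
--             if not prev_kept:
--                 out.append("---")
--             out.append(lines[i])
--             prev_kept = True
--         else:
--             prev_kept = False
--
--     if not out:
--         return f"No matches found for '{query}'."
--     return "\n".join(out)
-- ===== Notes on version B (the rewrite author's own statement) =====
-- stated objective: alternative
-- what changed: A accumulates every context-window index into a set, sorts it and groups consecutive runs; B never builds or sorts an index set: it precomputes a matched-flag per line and does one left-to-right scan over the lines, keeping line i iff some line within context_lines of it matched and emitting '---' exactly when a kept run starts.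
import Mathlib
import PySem

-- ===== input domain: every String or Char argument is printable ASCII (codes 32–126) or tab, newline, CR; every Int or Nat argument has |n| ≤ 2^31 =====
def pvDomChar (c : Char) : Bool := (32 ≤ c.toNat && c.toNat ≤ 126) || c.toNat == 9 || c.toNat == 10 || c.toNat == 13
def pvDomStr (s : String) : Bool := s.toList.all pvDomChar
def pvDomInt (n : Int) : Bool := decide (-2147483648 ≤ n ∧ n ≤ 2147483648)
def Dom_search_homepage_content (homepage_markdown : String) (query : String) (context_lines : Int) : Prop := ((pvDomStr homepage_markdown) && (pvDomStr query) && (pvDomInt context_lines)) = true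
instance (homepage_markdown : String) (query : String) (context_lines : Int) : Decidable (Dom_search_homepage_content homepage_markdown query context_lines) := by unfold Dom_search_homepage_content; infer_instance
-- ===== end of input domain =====

-- B replaces A's set-of-window-indices + sort + consecutive-grouping by a single scan
-- that keeps a line iff some line within context_lines of it matches (alternative decomposition, same cost).

-- ===== PORT A =====
def search_homepage_content (homepage_markdown : String) (query : String) (context_lines : Int) : String :=
  -- lines = homepage_markdown.split("\n"); the separator "\n" is non-empty, so split? is always `some`
  let lines := (PySem.Str.split? homepage_markdown "\n").getD []
  let query_lower := PySem.Str.lower query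
  -- for i, line in enumerate(lines): if query_lower in line.lower(): add window indices to the set
  let matching_indices : PySem.Set Int :=
    (PySem.List.enumerate lines).foldl
      (fun s q =>
        if PySem.Str.isIn query_lower (PySem.Str.lower q.2) then
          (PySem.List.pyRange (max 0 (q.1 - context_lines))
              (min (PySem.List.len lines) (q.1 + context_lines + 1))).foldl PySem.Set.add s
        else s)
      PySem.Set.empty
  if matching_indices = [] then
    "No matches found for '" ++ query ++ "'."
  else
    let sorted_indices := PySem.List.sorted matching_indices id
    -- result_lines/prev_idx loop; lines[idx] is always in range here, so pyGetD is exact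
    let res := sorted_indices.foldl
      (fun (st : List String × Int) idx =>
        ((if idx > st.2 + 1 then st.1 ++ ["---"] else st.1)
            ++ [PySem.List.pyGetD lines idx ""], idx))
      ([], -2)
    PySem.Str.join "\n" res.1

-- ===== PORT B =====
def search_homepage_content_alt (homepage_markdown : String) (query : String) (context_lines : Int) : String :=
  let lines := (PySem.Str.split? homepage_markdown "\n").getD []
  let query_lower := PySem.Str.lower query
  let matched := lines.map (fun line => PySem.Str.isIn query_lower (PySem.Str.lower line))
  let n := PySem.List.len lines
  -- keep(i): some line within context_lines of i matched; matched[j] is always in range, so pyGetD is exact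
  let keep := fun (i : Int) =>
    (PySem.List.pyRange (max 0 (i - context_lines)) (min n (i + context_lines + 1))).any
      (fun j => PySem.List.pyGetD matched j false)
  let res := (PySem.List.pyRange 0 n).foldl
    (fun (st : List String × Bool) i =>
      if keep i then
        ((if st.2 then st.1 else st.1 ++ ["---"]) ++ [PySem.List.pyGetD lines i ""], true)
      else (st.1, false))
    ([], false)
  if res.1 = [] then
    "No matches found for '" ++ query ++ "'."
  else
    PySem.Str.join "\n" res.1

-- ===== PRECONDITION & SPEC =====
def Spec_search_homepage_content (homepage_markdown : String) (query : String) (context_lines : Int) (out : String) : Prop := out = search_homepage_content_alt homepage_markdown query context_lines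
instance (homepage_markdown : String) (query : String) (context_lines : Int) (out : String) : Decidable (Spec_search_homepage_content homepage_markdown query context_lines out) := by unfold Spec_search_homepage_content; infer_instance

-- ===== CLAIM (what is proved, stated in full; the proofs are below) =====
def Claim_equal_search_homepage_content : Prop := ∀ (homepage_markdown : String) (query : String) (context_lines : Int), Dom_search_homepage_content homepage_markdown query context_lines → Spec_search_homepage_content homepage_markdown query context_lines (search_homepage_content homepage_markdown query context_lines)

-- ===== LEMMAS AND PROOFS =====

theorem pvFoldUpdateSpec (P : Nat → Bool) (W : Nat → List Int) : ∀ (m : Nat) (s : PySem.Set Int),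
    s.Nodup →
    (((List.range m).foldl (fun s k => if P k then PySem.Set.update s (W k) else s) s).Nodup ∧
      ∀ y : Int, y ∈ (List.range m).foldl (fun s k => if P k then PySem.Set.update s (W k) else s) s ↔
        y ∈ s ∨ ∃ k : Nat, k < m ∧ P k = true ∧ y ∈ W k) := by
  intro m
  induction m with
  | zero => intro s hs; simpa using hs
  | succ m ih =>
    intro s hs
    rw [List.range_succ, List.foldl_append]
    obtain ⟨hnd, hmem⟩ := ih s hs
    constructor
    · simp only [List.foldl_cons, List.foldl_nil]
      split
      · exact PySem.Set.nodup_update _ _ hnd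
      · exact hnd
    · intro y
      simp only [List.foldl_cons, List.foldl_nil]
      by_cases hp : P m
      · simp only [hp, if_true, PySem.Set.mem_update, hmem]
        constructor
        · rintro ((h | ⟨k, hk, hpk, hy⟩) | hw)
          · exact Or.inl h
          · exact Or.inr ⟨k, by omega, hpk, hy⟩
          · exact Or.inr ⟨m, by omega, hp, hw⟩
        · rintro (h | ⟨k, hk, hpk, hy⟩)
          · exact Or.inl (Or.inl h)
          · rcases Nat.lt_succ_iff_lt_or_eq.mp hk with h' | rfl
            · exact Or.inl (Or.inr ⟨k, h', hpk, hy⟩)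
            · exact Or.inr hy
      · rw [if_neg hp]
        rw [hmem]
        constructor
        · rintro (h | ⟨k, hk, hpk, hy⟩)
          · exact Or.inl h
          · exact Or.inr ⟨k, by omega, hpk, hy⟩
        · rintro (h | ⟨k, hk, hpk, hy⟩)
          · exact Or.inl h
          · rcases Nat.lt_succ_iff_lt_or_eq.mp hk with h' | rfl
            · exact Or.inr ⟨k, h', hpk, hy⟩
            · exact absurd hpk (by simp [hp])

theorem pvSetSpec (lines : List String) (p : String → Bool) (c : Int) :
    (((PySem.List.enumerate lines).foldl
        (fun s q =>
          if p q.2 then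
            (PySem.List.pyRange (max 0 (q.1 - c))
                (min (PySem.List.len lines) (q.1 + c + 1))).foldl PySem.Set.add s
          else s)
        PySem.Set.empty).Nodup ∧
      ∀ y : Int, y ∈ (PySem.List.enumerate lines).foldl
        (fun s q =>
          if p q.2 then
            (PySem.List.pyRange (max 0 (q.1 - c))
                (min (PySem.List.len lines) (q.1 + c + 1))).foldl PySem.Set.add s
          else s)
        PySem.Set.empty ↔
        ∃ k : Nat, k < lines.length ∧ p (lines.getD k "") = true ∧
          max 0 ((k : Int) - c) ≤ y ∧ y < min (lines.length : Int) ((k : Int) + c + 1)) := by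
  have hlen : PySem.List.len lines = (lines.length : Int) := by simp
  rw [PySem.List.enumerate_eq_map_pyRange lines "", hlen, PySem.List.pyRange_zero_natCast,
    List.foldl_map, List.foldl_map]
  have hstep : (fun (s : PySem.Set Int) (k : Nat) =>
      if p (PySem.List.pyGetD lines (k : Int) "") then
        (PySem.List.pyRange (max 0 ((k : Int) - c)) (min (lines.length : Int) ((k : Int) + c + 1))).foldl PySem.Set.add s
      else s)
      = (fun (s : PySem.Set Int) (k : Nat) =>
      if p (lines.getD k "") then
        PySem.Set.update s (PySem.List.pyRange (max 0 ((k : Int) - c)) (min (lines.length : Int) ((k : Int) + c + 1)))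
      else s) := by
    funext s k
    rw [PySem.List.pyGetD_natCast]
    rfl
  rw [hstep]
  obtain ⟨hnd, hmem⟩ := pvFoldUpdateSpec (fun k => p (lines.getD k ""))
    (fun k => PySem.List.pyRange (max 0 ((k : Int) - c)) (min (lines.length : Int) ((k : Int) + c + 1)))
    lines.length PySem.Set.empty (by simp [PySem.Set.empty])
  refine ⟨hnd, fun y => ?_⟩
  rw [hmem y]
  simp only [PySem.Set.empty, List.not_mem_nil, false_or, PySem.List.mem_pyRange_one]

def pvKeep (lines : List String) (p : String → Bool) (c : Int) (i : Int) : Bool :=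
  (PySem.List.pyRange (max 0 (i - c)) (min (PySem.List.len (lines.map p)) (i + c + 1))).any
    (fun j => PySem.List.pyGetD (lines.map p) j false)

theorem pvMatchedGetD (lines : List String) (p : String → Bool) (k : Nat) (h : k < lines.length) :
    (lines.map p).getD k false = p (lines.getD k "") := by
  rw [List.getD_eq_getElem _ _ (by simpa using h), List.getElem_map, List.getD_eq_getElem _ _ h]

theorem pvMemIffKeep (lines : List String) (p : String → Bool) (c : Int) (y : Int) :
    (∃ k : Nat, k < lines.length ∧ p (lines.getD k "") = true ∧
        max 0 ((k : Int) - c) ≤ y ∧ y < min (lines.length : Int) ((k : Int) + c + 1)) ↔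
      ∃ k : Nat, k < lines.length ∧ y = (k : Int) ∧ pvKeep lines p c (k : Int) = true := by
  have hlen : PySem.List.len (lines.map p) = (lines.length : Int) := by simp
  constructor
  · rintro ⟨k, hk, hp, h1, h2⟩
    have hy0 : 0 ≤ y := le_trans (le_max_left _ _) h1
    have hyn : y < (lines.length : Int) := lt_of_lt_of_le h2 (min_le_left _ _)
    refine ⟨y.toNat, by omega, by omega, ?_⟩
    unfold pvKeep
    rw [hlen, List.any_eq_true]
    refine ⟨(k : Int), ?_, ?_⟩
    · rw [PySem.List.mem_pyRange_one]
      constructor <;> omega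
    · rw [PySem.List.pyGetD_natCast, pvMatchedGetD lines p k hk]
      exact hp
  · rintro ⟨m, hm, rfl, hkeep⟩
    unfold pvKeep at hkeep
    rw [hlen, List.any_eq_true] at hkeep
    obtain ⟨j, hjmem, hj⟩ := hkeep
    rw [PySem.List.mem_pyRange_one] at hjmem
    have hj0 : 0 ≤ j := le_trans (le_max_left _ _) hjmem.1
    have hjn : j < (lines.length : Int) := lt_of_lt_of_le hjmem.2 (min_le_left _ _)
    refine ⟨j.toNat, by omega, ?_, ?_, ?_⟩
    · rw [PySem.List.pyGetD_of_nonneg (h := hj0)] at hj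
      rw [pvMatchedGetD lines p j.toNat (by omega)] at hj
      exact hj
    · omega
    · omega

theorem pvLoopSpec (g : Int → String) (keepN : Nat → Bool) : ∀ n : Nat,
    ((((List.range n).filter keepN).map (fun k : Nat => (k : Int))).foldl
        (fun (st : List String × Int) idx =>
          ((if idx > st.2 + 1 then st.1 ++ ["---"] else st.1) ++ [g idx], idx)) ([], -2)).1 =
      ((List.range n).foldl
        (fun (st : List String × Bool) k =>
          if keepN k then ((if st.2 then st.1 else st.1 ++ ["---"]) ++ [g (k : Int)], true)
          else (st.1, false)) ([], false)).1 ∧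
    ((((List.range n).filter keepN).map (fun k : Nat => (k : Int))).foldl
        (fun (st : List String × Int) idx =>
          ((if idx > st.2 + 1 then st.1 ++ ["---"] else st.1) ++ [g idx], idx)) ([], -2)).2 < (n : Int) ∧
    (((((List.range n).filter keepN).map (fun k : Nat => (k : Int))).foldl
        (fun (st : List String × Int) idx =>
          ((if idx > st.2 + 1 then st.1 ++ ["---"] else st.1) ++ [g idx], idx)) ([], -2)).2 = (n : Int) - 1 ↔
      ((List.range n).foldl
        (fun (st : List String × Bool) k =>
          if keepN k then ((if st.2 then st.1 else st.1 ++ ["---"]) ++ [g (k : Int)], true)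
          else (st.1, false)) ([], false)).2 = true) ∧
    ((List.range n).filter keepN = [] ↔
      ((List.range n).foldl
        (fun (st : List String × Bool) k =>
          if keepN k then ((if st.2 then st.1 else st.1 ++ ["---"]) ++ [g (k : Int)], true)
          else (st.1, false)) ([], false)).1 = []) := by
  intro n
  induction n with
  | zero =>
    refine ⟨rfl, by norm_num, ?_, by simp⟩
    simp only [List.range_zero, List.filter_nil, List.map_nil, List.foldl_nil]
    constructor
    · intro h; exact absurd h (by norm_num)
    · intro h; exact absurd h (by simp)
  | succ n ih =>
    obtain ⟨h1, h2, h3, h4⟩ := ih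
    rw [List.range_succ, List.filter_append, List.map_append, List.foldl_append, List.foldl_append]
    by_cases hk : keepN n
    · simp only [List.filter_cons, List.filter_nil, hk, if_true, List.map_cons, List.map_nil,
        List.foldl_cons, List.foldl_nil]
      refine ⟨?_, ?_, ?_, ?_⟩
      · congr 1
        by_cases hb : ((List.range n).foldl
            (fun (st : List String × Bool) k =>
              if keepN k then ((if st.2 then st.1 else st.1 ++ ["---"]) ++ [g (k : Int)], true)
              else (st.1, false)) ([], false)).2 = true
        · rw [if_pos hb]
          have hA2 := h3.mpr hb
          rw [if_neg (by omega)]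
          exact h1
        · rw [if_neg hb]
          have hA2 : ¬ ((((List.range n).filter keepN).map (fun k : Nat => (k : Int))).foldl
              (fun (st : List String × Int) idx =>
                ((if idx > st.2 + 1 then st.1 ++ ["---"] else st.1) ++ [g idx], idx)) ([], -2)).2 = (n : Int) - 1 :=
            fun h => hb (h3.mp h)
          rw [if_pos (by omega)]
          rw [h1]
      · push_cast; omega
      · push_cast
        constructor
        · intro _; trivial
        · intro _; omega
      · constructor
        · intro h; exact absurd h (by simp)
        · intro h; exact absurd h (by simp)
    · simp only [List.filter_cons, List.filter_nil, hk, if_false, List.map_nil, List.foldl_nil,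
        List.foldl_cons, Bool.false_eq_true]
      refine ⟨by simpa using h1, by push_cast; omega, ?_, by simpa using h4⟩
      constructor
      · intro h
        have : ¬ ((((List.range n).filter keepN).map (fun k : Nat => (k : Int))).foldl
            (fun (st : List String × Int) idx =>
              ((if idx > st.2 + 1 then st.1 ++ ["---"] else st.1) ++ [g idx], idx)) ([], -2)).2 = (n : Int) := by omega
        exact absurd h (by push_cast; omega)
      · intro h; exact absurd h (by simp)



theorem pvMain (lines : List String) (p : String → Bool) (c : Int) (msg : String) :
    (if List.foldl
          (fun s q1 =>
            if p q1.2 = true then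
              List.foldl PySem.Set.add s
                (PySem.List.pyRange (max 0 (q1.1 - c)) (min (PySem.List.len lines) (q1.1 + c + 1)))
            else s)
          PySem.Set.empty (PySem.List.enumerate lines) = [] then msg
     else
      PySem.Str.join "\n"
        (List.foldl
          (fun (st : List String × Int) idx =>
            ((if idx > st.2 + 1 then st.1 ++ ["---"] else st.1) ++ [PySem.List.pyGetD lines idx ""], idx))
          ([], -2)
          (PySem.List.sorted
            (List.foldl
              (fun s q1 =>
                if p q1.2 = true then
                  List.foldl PySem.Set.add s
                    (PySem.List.pyRange (max 0 (q1.1 - c)) (min (PySem.List.len lines) (q1.1 + c + 1)))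
                else s)
              PySem.Set.empty (PySem.List.enumerate lines)) id)).1) =
    (if (List.foldl
          (fun (st : List String × Bool) i =>
            if (PySem.List.pyRange (max 0 (i - c)) (min (PySem.List.len lines) (i + c + 1))).any
                (fun j => PySem.List.pyGetD (lines.map p) j false) = true then
              ((if st.2 = true then st.1 else st.1 ++ ["---"]) ++ [PySem.List.pyGetD lines i ""], true)
            else (st.1, false))
          ([], false) (PySem.List.pyRange 0 (PySem.List.len lines))).1 = [] then msg
     else
      PySem.Str.join "\n"
        (List.foldl
          (fun (st : List String × Bool) i =>
            if (PySem.List.pyRange (max 0 (i - c)) (min (PySem.List.len lines) (i + c + 1))).any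
                (fun j => PySem.List.pyGetD (lines.map p) j false) = true then
              ((if st.2 = true then st.1 else st.1 ++ ["---"]) ++ [PySem.List.pyGetD lines i ""], true)
            else (st.1, false))
          ([], false) (PySem.List.pyRange 0 (PySem.List.len lines))).1) := by
  obtain ⟨hnd, hmem⟩ := pvSetSpec lines p c
  have hb : ∀ i : Int,
      ((PySem.List.pyRange (max 0 (i - c)) (min (PySem.List.len lines) (i + c + 1))).any
        (fun j => PySem.List.pyGetD (lines.map p) j false)) = pvKeep lines p c i := by
    intro i; simp [pvKeep]
  -- rewrite B's fold into a fold over List.range lines.length with the Nat-level keep test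
  have hBlist : PySem.List.pyRange 0 (PySem.List.len lines)
      = (List.range lines.length).map (fun k : Nat => (k : Int)) := by
    simp [PySem.List.pyRange_zero_natCast]
  have hstepB : (fun (st : List String × Bool) (k : Nat) =>
        if (PySem.List.pyRange (max 0 ((k : Int) - c)) (min (PySem.List.len lines) ((k : Int) + c + 1))).any
            (fun j => PySem.List.pyGetD (lines.map p) j false) = true then
          ((if st.2 = true then st.1 else st.1 ++ ["---"]) ++ [PySem.List.pyGetD lines (k : Int) ""], true)
        else (st.1, false))
      = (fun (st : List String × Bool) (k : Nat) =>
        if (fun k : Nat => pvKeep lines p c (k : Int)) k = true then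
          ((if st.2 = true then st.1 else st.1 ++ ["---"])
              ++ [(fun i : Int => PySem.List.pyGetD lines i "") (k : Int)], true)
        else (st.1, false)) := by
    funext st k
    rw [hb]
  have hBeq : (List.foldl
        (fun (st : List String × Bool) i =>
          if (PySem.List.pyRange (max 0 (i - c)) (min (PySem.List.len lines) (i + c + 1))).any
              (fun j => PySem.List.pyGetD (lines.map p) j false) = true then
            ((if st.2 = true then st.1 else st.1 ++ ["---"]) ++ [PySem.List.pyGetD lines i ""], true)
          else (st.1, false))
        ([], false) (PySem.List.pyRange 0 (PySem.List.len lines)))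
      = (List.range lines.length).foldl
        (fun (st : List String × Bool) (k : Nat) =>
          if (fun k : Nat => pvKeep lines p c (k : Int)) k = true then
            ((if st.2 = true then st.1 else st.1 ++ ["---"])
                ++ [(fun i : Int => PySem.List.pyGetD lines i "") (k : Int)], true)
          else (st.1, false)) ([], false) := by
    rw [hBlist, List.foldl_map, hstepB]
  -- A's sorted set is the filtered index list
  have hLnd : ((((List.range lines.length).filter (fun k : Nat => pvKeep lines p c (k : Int))).map
      (fun k : Nat => (k : Int)))).Nodup :=
    ((List.nodup_range).filter _).map (fun a b h => by exact_mod_cast h)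
  have hLmem : ∀ y : Int,
      y ∈ (((List.range lines.length).filter (fun k : Nat => pvKeep lines p c (k : Int))).map
        (fun k : Nat => (k : Int))) ↔
      y ∈ List.foldl
        (fun s q1 =>
          if p q1.2 = true then
            List.foldl PySem.Set.add s
              (PySem.List.pyRange (max 0 (q1.1 - c)) (min (PySem.List.len lines) (q1.1 + c + 1)))
          else s)
        PySem.Set.empty (PySem.List.enumerate lines) := by
    intro y
    rw [hmem y, pvMemIffKeep lines p c y]
    simp only [List.mem_map, List.mem_filter, List.mem_range]
    constructor
    · rintro ⟨k, ⟨hk, hkeep⟩, rfl⟩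
      exact ⟨k, hk, rfl, hkeep⟩
    · rintro ⟨k, hk, rfl, hkeep⟩
      exact ⟨k, ⟨hk, hkeep⟩, rfl⟩
  have hperm : ((((List.range lines.length).filter (fun k : Nat => pvKeep lines p c (k : Int))).map
      (fun k : Nat => (k : Int)))).Perm
      (List.foldl
        (fun s q1 =>
          if p q1.2 = true then
            List.foldl PySem.Set.add s
              (PySem.List.pyRange (max 0 (q1.1 - c)) (min (PySem.List.len lines) (q1.1 + c + 1)))
          else s)
        PySem.Set.empty (PySem.List.enumerate lines)) :=
    (List.perm_ext_iff_of_nodup hLnd hnd).mpr hLmem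
  have hpair : ((((List.range lines.length).filter (fun k : Nat => pvKeep lines p c (k : Int))).map
      (fun k : Nat => (k : Int)))).Pairwise (fun a b => id a < id b) := by
    refine List.Pairwise.map _ (fun a b h => ?_) ((List.pairwise_lt_range).filter _)
    simpa using h
  have hsorted := PySem.List.sorted_eq_of_perm_of_pairwise_lt _ _ id hperm hpair
  obtain ⟨e1, _, _, e4⟩ := pvLoopSpec (fun i : Int => PySem.List.pyGetD lines i "")
    (fun k : Nat => pvKeep lines p c (k : Int)) lines.length
  rw [hBeq, hsorted]
  have hempty : (List.foldl
        (fun s q1 =>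
          if p q1.2 = true then
            List.foldl PySem.Set.add s
              (PySem.List.pyRange (max 0 (q1.1 - c)) (min (PySem.List.len lines) (q1.1 + c + 1)))
          else s)
        PySem.Set.empty (PySem.List.enumerate lines) = []) ↔
      ((List.range lines.length).foldl
        (fun (st : List String × Bool) (k : Nat) =>
          if (fun k : Nat => pvKeep lines p c (k : Int)) k = true then
            ((if st.2 = true then st.1 else st.1 ++ ["---"])
                ++ [(fun i : Int => PySem.List.pyGetD lines i "") (k : Int)], true)
          else (st.1, false)) ([], false)).1 = [] := by
    constructor
    · intro h
      rw [h] at hperm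
      have hL := List.Perm.eq_nil hperm
      exact e4.mp (by simpa using hL)
    · intro h
      have hf := e4.mpr h
      have hL : (((List.range lines.length).filter (fun k : Nat => pvKeep lines p c (k : Int))).map
          (fun k : Nat => (k : Int))) = [] := by simp [hf]
      rw [hL] at hperm
      exact hperm.nil_eq.symm
  by_cases hS : List.foldl
        (fun s q1 =>
          if p q1.2 = true then
            List.foldl PySem.Set.add s
              (PySem.List.pyRange (max 0 (q1.1 - c)) (min (PySem.List.len lines) (q1.1 + c + 1)))
          else s)
        PySem.Set.empty (PySem.List.enumerate lines) = []
  · rw [if_pos hS, if_pos (hempty.mp hS)]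
  · rw [if_neg hS, if_neg (fun h => hS (hempty.mpr h))]
    exact congrArg (PySem.Str.join "\n") e1


-- ===== VERDICT (by name: the statement is the Claim_ definition above) =====
theorem search_homepage_content_spec : Claim_equal_search_homepage_content := by
  intro md q c _
  unfold Spec_search_homepage_content search_homepage_content search_homepage_content_alt
  simp only []
  exact pvMain ((PySem.Str.split? md "\n").getD [])
    (fun line => PySem.Str.isIn (PySem.Str.lower q) (PySem.Str.lower line)) c
    ("No matches found for '" ++ q ++ "'.")
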